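-- pv_equiv track=rewrite | github.com/data-jeong/lecture | python3_tutorial/06_web_scraping/news_crawler/analyzers/trend.py | _get_length_distribution
-- ===== SOURCE A (Python) =====
-- from typing import List, Dict, Any, Optional, Tuple
--
-- def _get_length_distribution(lengths: List[int]) -> Dict[str, int]:
--     """길이 분포 계산"""
--     distribution = {
--         'very_short': 0,  # < 100 단어
--         'short': 0,       # 100-300 단어
--         'medium': 0,      # 300-600 단어
--         'long': 0,        # 600-1000 단어
--         'very_long': 0    # > 1000 단어
--     }
--
--     for length in lengths:
--         if length < 100:
--             distribution['very_short'] += 1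
--         elif length < 300:
--             distribution['short'] += 1
--         elif length < 600:
--             distribution['medium'] += 1
--         elif length < 1000:
--             distribution['long'] += 1
--         else:
--             distribution['very_long'] += 1
--
--     return distribution
-- ===== SOURCE B (Python) =====
-- def _get_length_distribution(lengths):
--     """길이 분포 계산 — cumulative counts below each threshold, buckets as their differences."""
--     n = len(lengths)
--     c100 = sum(1 for x in lengths if x < 100)
--     c300 = sum(1 for x in lengths if x < 300)
--     c600 = sum(1 for x in lengths if x < 600)
--     c1000 = sum(1 for x in lengths if x < 1000)
--     return {
--         'very_short': c100,
--         'short': c300 - c100,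
--         'medium': c600 - c300,
--         'long': c1000 - c600,
--         'very_long': n - c1000,
--     }
-- ===== Notes on version B (the rewrite author's own statement) =====
-- stated objective: alternative
-- what changed: Instead of classifying each element into a bucket inside one loop updating a dict, B computes the cumulative counts of lengths below each threshold (four independent counting passes) and obtains each bucket as the difference of two adjacent cumulative counts.
import Mathlib
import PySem

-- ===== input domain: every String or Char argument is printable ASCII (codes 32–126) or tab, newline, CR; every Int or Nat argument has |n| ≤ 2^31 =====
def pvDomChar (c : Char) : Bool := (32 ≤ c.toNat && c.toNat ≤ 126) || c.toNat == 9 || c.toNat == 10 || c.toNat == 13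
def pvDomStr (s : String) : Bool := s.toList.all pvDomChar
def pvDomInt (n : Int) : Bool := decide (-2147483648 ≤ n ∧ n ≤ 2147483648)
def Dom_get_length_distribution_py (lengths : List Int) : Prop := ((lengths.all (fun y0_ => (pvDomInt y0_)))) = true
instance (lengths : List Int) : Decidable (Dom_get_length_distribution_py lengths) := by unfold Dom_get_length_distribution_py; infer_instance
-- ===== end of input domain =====

-- B replaces A's per-element bucketing loop by four cumulative below-threshold counts whose differences are the buckets (alternative decomposition; same cost).

-- ===== PORT A =====
def get_length_distribution_py (lengths : List Int) : List (String × Int) :=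
  let distribution : PySem.Dict String Int :=
    PySem.Dict.ofList [("very_short", 0), ("short", 0), ("medium", 0), ("long", 0), ("very_long", 0)]
  (lengths.foldl (fun d length =>
      if length < 100 then d.modify "very_short" 0 (· + 1)
      else if length < 300 then d.modify "short" 0 (· + 1)
      else if length < 600 then d.modify "medium" 0 (· + 1)
      else if length < 1000 then d.modify "long" 0 (· + 1)
      else d.modify "very_long" 0 (· + 1)) distribution).items

-- ===== PORT B =====
-- sum(1 for x in lengths if x < t): a fold accumulating 1 on each element below t
def pvCountBelow (lengths : List Int) (t : Int) : Int :=
  lengths.foldl (fun acc x => if x < t then acc + 1 else acc) 0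

def get_length_distribution_py_alt (lengths : List Int) : List (String × Int) :=
  let n : Int := lengths.length
  let c100 := pvCountBelow lengths 100
  let c300 := pvCountBelow lengths 300
  let c600 := pvCountBelow lengths 600
  let c1000 := pvCountBelow lengths 1000
  (PySem.Dict.ofList
    [("very_short", c100), ("short", c300 - c100), ("medium", c600 - c300),
     ("long", c1000 - c600), ("very_long", n - c1000)]).items

-- ===== PRECONDITION & SPEC =====
def Spec_get_length_distribution_py (lengths : List Int) (out : List (String × Int)) : Prop := out = get_length_distribution_py_alt lengths
instance (lengths : List Int) (out : List (String × Int)) : Decidable (Spec_get_length_distribution_py lengths out) := by unfold Spec_get_length_distribution_py; infer_instance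

-- ===== CLAIM (what is proved, stated in full; the proofs are below) =====
def Claim_equal_get_length_distribution_py : Prop := ∀ (lengths : List Int), Dom_get_length_distribution_py lengths → Spec_get_length_distribution_py lengths (get_length_distribution_py lengths)

-- ===== LEMMAS AND PROOFS =====

-- one modify step of A's loop on the five-key dict, per bucket (keys are literal, so each is rfl)
lemma dm0 (a b c d e : Int) :
    (PySem.Dict.ofList [("very_short", a), ("short", b), ("medium", c), ("long", d), ("very_long", e)]).modify "very_short" 0 (· + 1) =
    PySem.Dict.ofList [("very_short", a + 1), ("short", b), ("medium", c), ("long", d), ("very_long", e)] := rfl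

lemma dm1 (a b c d e : Int) :
    (PySem.Dict.ofList [("very_short", a), ("short", b), ("medium", c), ("long", d), ("very_long", e)]).modify "short" 0 (· + 1) =
    PySem.Dict.ofList [("very_short", a), ("short", b + 1), ("medium", c), ("long", d), ("very_long", e)] := rfl

lemma dm2 (a b c d e : Int) :
    (PySem.Dict.ofList [("very_short", a), ("short", b), ("medium", c), ("long", d), ("very_long", e)]).modify "medium" 0 (· + 1) =
    PySem.Dict.ofList [("very_short", a), ("short", b), ("medium", c + 1), ("long", d), ("very_long", e)] := rfl

lemma dm3 (a b c d e : Int) :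
    (PySem.Dict.ofList [("very_short", a), ("short", b), ("medium", c), ("long", d), ("very_long", e)]).modify "long" 0 (· + 1) =
    PySem.Dict.ofList [("very_short", a), ("short", b), ("medium", c), ("long", d + 1), ("very_long", e)] := rfl

lemma dm4 (a b c d e : Int) :
    (PySem.Dict.ofList [("very_short", a), ("short", b), ("medium", c), ("long", d), ("very_long", e)]).modify "very_long" 0 (· + 1) =
    PySem.Dict.ofList [("very_short", a), ("short", b), ("medium", c), ("long", d), ("very_long", e + 1)] := rfl


-- invariant of A's loop: the five counters accumulate the counts of the disjoint ranges
lemma foldA_items (l : List Int) (a b c d e : Int) :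
    (l.foldl (fun d length =>
        if length < 100 then d.modify "very_short" 0 (· + 1)
        else if length < 300 then d.modify "short" 0 (· + 1)
        else if length < 600 then d.modify "medium" 0 (· + 1)
        else if length < 1000 then d.modify "long" 0 (· + 1)
        else d.modify "very_long" 0 (· + 1))
      (PySem.Dict.ofList [("very_short", a), ("short", b), ("medium", c), ("long", d), ("very_long", e)])).items
    = [("very_short", a + (l.countP (fun x => x < 100) : Int)),
       ("short", b + (l.countP (fun x => 100 ≤ x && x < 300) : Int)),
       ("medium", c + (l.countP (fun x => 300 ≤ x && x < 600) : Int)),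
       ("long", d + (l.countP (fun x => 600 ≤ x && x < 1000) : Int)),
       ("very_long", e + (l.countP (fun x => 1000 ≤ x) : Int))] := by
  induction l generalizing a b c d e with
  | nil => simp only [List.foldl_nil, List.countP_nil, Int.natCast_zero, add_zero]; rfl
  | cons x xs ih =>
    simp only [List.foldl_cons]
    split_ifs with h1 h2 h3 h4
    · rw [dm0, ih]
      simp only [List.countP_cons]
      refine congrArg₂ _ ?_ (congrArg₂ _ ?_ (congrArg₂ _ ?_ (congrArg₂ _ ?_ (congrArg₂ _ ?_ rfl))))
      all_goals
        simp only [Prod.mk.injEq, true_and, decide_eq_true_eq, Bool.and_eq_true]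
        split_ifs <;> push_cast <;> omega
    · rw [dm1, ih]
      simp only [List.countP_cons]
      refine congrArg₂ _ ?_ (congrArg₂ _ ?_ (congrArg₂ _ ?_ (congrArg₂ _ ?_ (congrArg₂ _ ?_ rfl))))
      all_goals
        simp only [Prod.mk.injEq, true_and, decide_eq_true_eq, Bool.and_eq_true]
        split_ifs <;> push_cast <;> omega
    · rw [dm2, ih]
      simp only [List.countP_cons]
      refine congrArg₂ _ ?_ (congrArg₂ _ ?_ (congrArg₂ _ ?_ (congrArg₂ _ ?_ (congrArg₂ _ ?_ rfl))))
      all_goals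
        simp only [Prod.mk.injEq, true_and, decide_eq_true_eq, Bool.and_eq_true]
        split_ifs <;> push_cast <;> omega
    · rw [dm3, ih]
      simp only [List.countP_cons]
      refine congrArg₂ _ ?_ (congrArg₂ _ ?_ (congrArg₂ _ ?_ (congrArg₂ _ ?_ (congrArg₂ _ ?_ rfl))))
      all_goals
        simp only [Prod.mk.injEq, true_and, decide_eq_true_eq, Bool.and_eq_true]
        split_ifs <;> push_cast <;> omega
    · rw [dm4, ih]
      simp only [List.countP_cons]
      refine congrArg₂ _ ?_ (congrArg₂ _ ?_ (congrArg₂ _ ?_ (congrArg₂ _ ?_ (congrArg₂ _ ?_ rfl))))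
      all_goals
        simp only [Prod.mk.injEq, true_and, decide_eq_true_eq, Bool.and_eq_true]
        split_ifs <;> push_cast <;> omega

-- B's cumulative count below t is the countP of the strict range
lemma countBelow_eq (l : List Int) (t : Int) :
    pvCountBelow l t = (l.countP (fun x => x < t) : Int) := by
  have := PySem.List.foldl_if_add_one (fun x => x < t) l (0 : Int)
  simpa [pvCountBelow] using this

-- splitting a cumulative count at a lower threshold
lemma countP_split (l : List Int) (a b : Int) (hab : a ≤ b) :
    (l.countP (fun x => x < b)) = l.countP (fun x => x < a) + l.countP (fun x => a ≤ x && x < b) := by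
  induction l with
  | nil => rfl
  | cons x xs ih =>
    simp only [List.countP_cons, decide_eq_true_eq, Bool.and_eq_true]
    split_ifs <;> omega

lemma countP_compl (l : List Int) (t : Int) :
    l.countP (fun x => x < t) + l.countP (fun x => t ≤ x) = l.length := by
  induction l with
  | nil => rfl
  | cons x xs ih =>
    simp only [List.countP_cons, decide_eq_true_eq, List.length_cons]
    split_ifs <;> omega

-- ===== VERDICT (by name: the statement is the Claim_ definition above) =====
theorem get_length_distribution_py_spec : Claim_equal_get_length_distribution_py := by
  intro lengths _
  unfold Spec_get_length_distribution_py get_length_distribution_py get_length_distribution_py_alt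
  rw [foldA_items]
  have e1 := countBelow_eq lengths 100
  have e2 := countBelow_eq lengths 300
  have e3 := countBelow_eq lengths 600
  have e4 := countBelow_eq lengths 1000
  have s1 := countP_split lengths 100 300 (by norm_num)
  have s2 := countP_split lengths 300 600 (by norm_num)
  have s3 := countP_split lengths 600 1000 (by norm_num)
  have c4 := countP_compl lengths 1000
  show _ = (PySem.Dict.ofList _).items
  rw [show ∀ (v w x y z : Int), (PySem.Dict.ofList [("very_short", v), ("short", w), ("medium", x), ("long", y), ("very_long", z)]).items = [("very_short", v), ("short", w), ("medium", x), ("long", y), ("very_long", z)] from fun _ _ _ _ _ => rfl]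
  refine congrArg₂ _ ?_ (congrArg₂ _ ?_ (congrArg₂ _ ?_ (congrArg₂ _ ?_ (congrArg₂ _ ?_ rfl))))
  all_goals
    simp only [Prod.mk.injEq, true_and]
    push_cast at *
    omega
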